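-- pv_equiv track=rewrite | github.com/PostHog/posthog | model_migration/import_rewriter.py | update_module_path
-- ===== SOURCE A (Python) =====
-- def update_module_path(path: str, module_moves: dict[str, str]) -> str:
--     """
--     If a module path (or any of its prefixes) is moved, rewrite it.
--     E.g. posthog.warehouse.models.table -> products.data_warehouse.backend.models.table
--     if posthog.warehouse moved.
--     """
--     segments = path.split(".")
--     # Try from longest to shortest prefix
--     for i in range(len(segments), 0, -1):
--         prefix = ".".join(segments[:i])
--         if prefix in module_moves:
--             new_prefix = module_moves[prefix]
--             return ".".join([new_prefix] + segments[i:])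
--     return path
-- ===== SOURCE B (Python) =====
-- def update_module_path(path: str, module_moves: dict[str, str]) -> str:
--     """Scan module_moves once, keeping the longest key that is a
--     segment-boundary prefix of path; rewrite with it if found."""
--     best_key = None
--     best_value = None
--     for key, value in module_moves.items():
--         if path == key or path.startswith(key + "."):
--             if best_key is None or len(key) > len(best_key):
--                 best_key, best_value = key, value
--     if best_key is None:
--         return path
--     return best_value + path[len(best_key):]
-- ===== Notes on version B (the rewrite author's own statement) =====
-- stated objective: alternative
-- what changed: Instead of splitting the path and probing the dict with each of its prefixes from longest to shortest, B makes one pass over module_moves.items(), testing each key for being a segment-boundary prefix (path == key or path.startswith(key + '.')) and keeping the longest match, then splices the replacement with string arithmetic.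
import Mathlib
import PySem

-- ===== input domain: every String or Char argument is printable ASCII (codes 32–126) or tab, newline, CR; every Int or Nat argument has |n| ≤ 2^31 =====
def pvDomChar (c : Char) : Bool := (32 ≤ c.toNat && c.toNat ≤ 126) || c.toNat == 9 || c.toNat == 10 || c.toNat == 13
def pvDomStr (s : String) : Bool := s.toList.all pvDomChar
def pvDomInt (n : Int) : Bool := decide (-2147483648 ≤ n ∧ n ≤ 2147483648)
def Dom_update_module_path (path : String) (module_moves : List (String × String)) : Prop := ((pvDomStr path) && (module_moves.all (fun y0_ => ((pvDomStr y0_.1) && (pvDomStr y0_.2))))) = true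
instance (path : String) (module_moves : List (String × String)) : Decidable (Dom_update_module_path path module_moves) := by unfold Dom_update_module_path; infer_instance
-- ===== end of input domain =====

-- B replaces A's longest-to-shortest probing of the path's own prefixes by a single scan of
-- module_moves that keeps the longest segment-boundary-prefix key (alternative decomposition).

-- ===== PORT A =====
-- Port of A's `for i in range(len(segments), 0, -1)` loop: the argument counts down from
-- len(segments); `i + 1` is the Python loop variable i, prefix = ".".join(segments[:i]).
def umpA_loop (segments : List (List Char)) (d : PySem.Dict (List Char) (List Char)) : Nat → Option (List Char)
  | 0 => none
  | i + 1 =>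
    let pre := PySem.Chars.join ['.'] (segments.take (i + 1))
    match d.get? pre with                                   -- `if prefix in module_moves: module_moves[prefix]`
    | some newPre => some (PySem.Chars.join ['.'] (newPre :: segments.drop (i + 1)))
    | none => umpA_loop segments d i

def update_module_path (path : String) (module_moves : List (String × String)) : String :=
  let d := PySem.Dict.ofList (module_moves.map (fun kv => (kv.1.toList, kv.2.toList)))
  let segments := PySem.Chars.splitOn path.toList ['.']     -- path.split(".")
  match umpA_loop segments d segments.length with
  | some r => String.ofList r
  | none => path                                            -- fell through the loop: return path

-- ===== PORT B =====
-- Port of B's `for key, value in module_moves.items()` scan keeping the longest matching key.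
def umpB_scan (s : List Char) : List (List Char × List Char) → Option (List Char × List Char) → Option (List Char × List Char)
  | [], best => best
  | (key, value) :: rest, best =>
    if s == key || PySem.Chars.startswith s (key ++ ['.']) then   -- path == key or path.startswith(key + ".")
      match best with
      | none => umpB_scan s rest (some (key, value))              -- best_key is None
      | some (bk, bv) =>
        if bk.length < key.length then umpB_scan s rest (some (key, value))   -- len(key) > len(best_key)
        else umpB_scan s rest (some (bk, bv))
    else umpB_scan s rest best

def update_module_path_alt (path : String) (module_moves : List (String × String)) : String :=
  let d := PySem.Dict.ofList (module_moves.map (fun kv => (kv.1.toList, kv.2.toList)))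
  match umpB_scan path.toList d.items none with
  | none => path                                            -- best_key is None: return path
  | some (bk, bv) => String.ofList (bv ++ path.toList.drop bk.length)  -- best_value + path[len(best_key):]

-- ===== PRECONDITION & SPEC =====
def Spec_update_module_path (path : String) (module_moves : List (String × String)) (out : String) : Prop := out = update_module_path_alt path module_moves
instance (path : String) (module_moves : List (String × String)) (out : String) : Decidable (Spec_update_module_path path module_moves out) := by unfold Spec_update_module_path; infer_instance

-- ===== CLAIM (what is proved, stated in full; the proofs are below) =====
def Claim_equal_update_module_path : Prop := ∀ (path : String) (module_moves : List (String × String)), Dom_update_module_path path module_moves → Spec_update_module_path path module_moves (update_module_path path module_moves)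

-- ===== LEMMAS AND PROOFS =====

-- Specification-level splitter: what `path.split(".")` computes, in small-step form.
def fSplit : List Char → List (List Char)
  | [] => [[]]
  | c :: t => if c = '.' then [] :: fSplit t else (fSplit t).modifyHead (c :: ·)

-- the boundary-prefix test used by B
def mtch (s k : List Char) : Bool := s == k || PySem.Chars.startswith s (k ++ ['.'])

-- P i = ".".join(segments[:i])
def pfx (s : List Char) (i : Nat) : List Char := PySem.Chars.join ['.'] ((fSplit s).take i)

theorem fSplit_ne_nil (s : List Char) : fSplit s ≠ [] := by
  induction s with
  | nil => simp [fSplit]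
  | cons c t ih =>
    simp only [fSplit]
    split_ifs
    · simp
    · cases hft : fSplit t with
      | nil => exact absurd hft ih
      | cons a l => simp [List.modifyHead]

theorem go_spec (l : List Char) : ∀ (fuel : Nat) (cur : List Char) (acc : List (List Char)),
    l.length < fuel →
    PySem.Chars.splitOn.go ['.'] fuel l cur acc
      = acc.reverse ++ (fSplit l).modifyHead (cur.reverse ++ ·) := by
  induction l with
  | nil =>
    intro fuel cur acc _
    cases fuel <;> simp [PySem.Chars.splitOn.go, fSplit]
  | cons c rest ih =>
    intro fuel cur acc hf
    obtain ⟨f, rfl⟩ : ∃ f, fuel = f + 1 := ⟨fuel - 1, by omega⟩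
    have hf' : rest.length < f := by simp at hf; omega
    by_cases hc : c = '.'
    · subst hc
      have hp : (['.'] : List Char).isPrefixOf ('.' :: rest) = true := by simp [List.isPrefixOf]
      simp only [PySem.Chars.splitOn.go, hp, if_true]
      rw [show List.drop ['.'].length ('.' :: rest) = rest from rfl,
        ih f [] (cur.reverse :: acc) hf']
      cases hfr : fSplit rest with
      | nil => exact absurd hfr (fSplit_ne_nil rest)
      | cons a t => simp [fSplit, hfr, List.modifyHead]
    · have hp : (['.'] : List Char).isPrefixOf (c :: rest) = false := by
        simp [List.isPrefixOf]; intro h; exact absurd h.symm hc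
      simp only [PySem.Chars.splitOn.go, hp, Bool.false_eq_true, if_false]
      rw [ih f (c :: cur) acc hf']
      cases hfr : fSplit rest with
      | nil => exact absurd hfr (fSplit_ne_nil rest)
      | cons a t => simp [fSplit, hc, hfr, List.modifyHead]

theorem splitOn_eq_fSplit (s : List Char) : PySem.Chars.splitOn s ['.'] = fSplit s := by
  rw [PySem.Chars.splitOn, go_spec s (s.length + 1) [] [] (by omega)]
  cases hfs : fSplit s with
  | nil => exact absurd hfs (fSplit_ne_nil s)
  | cons a t => simp [List.modifyHead]

theorem join_modifyHead_cons (c : Char) (l : List (List Char)) (h : l ≠ []) :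
    PySem.Chars.join ['.'] (l.modifyHead (c :: ·)) = c :: PySem.Chars.join ['.'] l := by
  match l with
  | [] => exact absurd rfl h
  | [a] => simp [List.modifyHead, PySem.Chars.join_singleton]
  | a :: b :: t =>
    simp only [List.modifyHead, PySem.Chars.join_cons_cons]
    simp

theorem join_fSplit (s : List Char) : PySem.Chars.join ['.'] (fSplit s) = s := by
  induction s with
  | nil => simp [fSplit, PySem.Chars.join_singleton]
  | cons c t ih =>
    by_cases hc : c = '.'
    · subst hc
      simp only [fSplit, reduceIte]
      cases hfr : fSplit t with
      | nil => exact absurd hfr (fSplit_ne_nil t)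
      | cons a l =>
        rw [hfr] at ih
        rw [PySem.Chars.join_cons_cons, ih]
        simp
    · simp only [fSplit, if_neg hc]
      rw [join_modifyHead_cons c _ (fSplit_ne_nil t), ih]

theorem fSplit_append (a b : List Char) : fSplit (a ++ '.' :: b) = fSplit a ++ fSplit b := by
  induction a with
  | nil => simp [fSplit]
  | cons x a' ih =>
    by_cases hx : x = '.'
    · subst hx; simp [fSplit, ih]
    · simp only [List.cons_append, fSplit, if_neg hx, ih]
      cases hfa : fSplit a' with
      | nil => exact absurd hfa (fSplit_ne_nil a')
      | cons h t => simp [List.modifyHead]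

theorem join_append_nonempty (B : List (List Char)) (hB : B ≠ []) :
    ∀ A : List (List Char), A ≠ [] →
    PySem.Chars.join ['.'] (A ++ B) = PySem.Chars.join ['.'] A ++ '.' :: PySem.Chars.join ['.'] B := by
  intro A
  induction A with
  | nil => intro h; exact absurd rfl h
  | cons a A' ih =>
    intro _
    cases A' with
    | nil =>
      cases B with
      | nil => exact absurd rfl hB
      | cons q t => simp [PySem.Chars.join_cons_cons, PySem.Chars.join_singleton]
    | cons a2 t2 =>
      rw [show (a :: a2 :: t2) ++ B = a :: ((a2 :: t2) ++ B) from rfl,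
        show (a2 :: t2) ++ B = a2 :: (t2 ++ B) from rfl,
        PySem.Chars.join_cons_cons, show a2 :: (t2 ++ B) = (a2 :: t2) ++ B from rfl,
        ih (by simp), PySem.Chars.join_cons_cons]
      simp

theorem pfx_length_lt (s : List Char) {i j : Nat} (hi : 1 ≤ i) (hij : i < j) (hj : j ≤ (fSplit s).length) :
    (pfx s i).length < (pfx s j).length := by
  have htk : ((fSplit s).take j).take i = (fSplit s).take i := by
    rw [List.take_take]; congr 1; omega
  have hsplit : (fSplit s).take j = (fSplit s).take i ++ ((fSplit s).take j).drop i := by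
    rw [← htk, List.take_append_drop]
  have hlen1 : ((fSplit s).take i).length = i := by
    rw [List.length_take]; omega
  have hlen2 : (((fSplit s).take j).drop i).length = j - i := by
    rw [List.length_drop, List.length_take]; omega
  have h1 : (fSplit s).take i ≠ [] := by
    intro h; rw [h] at hlen1; simp at hlen1; omega
  have h2 : ((fSplit s).take j).drop i ≠ [] := by
    intro h; rw [h] at hlen2; simp at hlen2; omega
  unfold pfx
  rw [hsplit, join_append_nonempty _ h2 _ h1]
  simp

theorem mtch_iff (s k : List Char) :
    mtch s k = true ↔ ∃ i, 1 ≤ i ∧ i ≤ (fSplit s).length ∧ k = pfx s i := by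
  constructor
  · intro h
    rcases Bool.or_eq_true_iff.mp h with h | h
    · refine ⟨(fSplit s).length, ?_, le_refl _, ?_⟩
      · have := fSplit_ne_nil s
        cases hfs : fSplit s with
        | nil => exact absurd hfs this
        | cons a t => simp
      · rw [pfx, List.take_length, join_fSplit]
        exact (beq_iff_eq.mp h).symm
    · obtain ⟨t, ht⟩ := (PySem.Chars.startswith_iff s (k ++ ['.'])).mp h
      have hs : s = k ++ '.' :: t := by rw [← ht]; simp
      refine ⟨(fSplit k).length, ?_, ?_, ?_⟩
      · have := fSplit_ne_nil k
        cases hfk : fSplit k with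
        | nil => exact absurd hfk this
        | cons a l => simp
      · rw [hs, fSplit_append, List.length_append]; omega
      · rw [pfx, hs, fSplit_append, List.take_left, join_fSplit]
  · rintro ⟨i, hi1, hi2, rfl⟩
    rcases eq_or_lt_of_le hi2 with heq | hlt
    · apply Bool.or_eq_true_iff.mpr; left
      rw [heq, pfx, List.take_length, join_fSplit]
      exact beq_iff_eq.mpr rfl
    · apply Bool.or_eq_true_iff.mpr; right
      apply (PySem.Chars.startswith_iff s _).mpr
      have hdec : fSplit s = (fSplit s).take i ++ (fSplit s).drop i := (List.take_append_drop _ _).symm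
      have hl1 : ((fSplit s).take i).length = i := by rw [List.length_take]; omega
      have hl2 : ((fSplit s).drop i).length = (fSplit s).length - i := by rw [List.length_drop]
      have h1 : (fSplit s).take i ≠ [] := by
        intro h; rw [h] at hl1; simp at hl1; omega
      have h2 : (fSplit s).drop i ≠ [] := by
        intro h; rw [h] at hl2; simp at hl2; omega
      set P := pfx s i with hP
      set T := PySem.Chars.join ['.'] ((fSplit s).drop i) with hT
      have hs : s = P ++ '.' :: T := by
        conv_lhs => rw [← join_fSplit s, hdec]
        exact join_append_nonempty _ h2 _ h1
      exact ⟨T, by rw [hs]; simp⟩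

theorem join_cons_ne_nil (v : List Char) (l : List (List Char)) (h : l ≠ []) :
    PySem.Chars.join ['.'] (v :: l) = v ++ '.' :: PySem.Chars.join ['.'] l := by
  cases l with
  | nil => exact absurd rfl h
  | cons q t => rw [PySem.Chars.join_cons_cons]; simp

theorem out_eq (s v : List Char) (j : Nat) (hj1 : 1 ≤ j) (hjn : j ≤ (fSplit s).length) :
    PySem.Chars.join ['.'] (v :: (fSplit s).drop j) = v ++ s.drop (pfx s j).length := by
  rcases eq_or_lt_of_le hjn with heq | hlt
  · rw [heq, List.drop_length, pfx, List.take_length, join_fSplit,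
      List.drop_length, PySem.Chars.join_singleton]
    simp
  · have hl1 : ((fSplit s).take j).length = j := by rw [List.length_take]; omega
    have hl2 : ((fSplit s).drop j).length = (fSplit s).length - j := by rw [List.length_drop]
    have h1 : (fSplit s).take j ≠ [] := by
      intro h; rw [h] at hl1; simp at hl1; omega
    have h2 : (fSplit s).drop j ≠ [] := by
      intro h; rw [h] at hl2; simp at hl2; omega
    set P := pfx s j with hP
    set T := PySem.Chars.join ['.'] ((fSplit s).drop j) with hT
    have hs : s = P ++ '.' :: T := by
      conv_lhs => rw [← join_fSplit s, ← List.take_append_drop j (fSplit s)]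
      exact join_append_nonempty _ h2 _ h1
    rw [join_cons_ne_nil v _ h2, ← hT]
    have hdrop : s.drop P.length = '.' :: T := by rw [hs, List.drop_left]
    rw [hdrop]

def hitA (s : List Char) (d : PySem.Dict (List Char) (List Char)) : Nat → Option (Nat × List Char)
  | 0 => none
  | i + 1 =>
    match d.get? (pfx s (i + 1)) with
    | some v => some (i + 1, v)
    | none => hitA s d i

theorem umpA_loop_eq_hitA (s : List Char) (d : PySem.Dict (List Char) (List Char)) (i : Nat) :
    umpA_loop (fSplit s) d i = (hitA s d i).map (fun p => PySem.Chars.join ['.'] (p.2 :: (fSplit s).drop p.1)) := by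
  induction i with
  | zero => simp [umpA_loop, hitA]
  | succ i ih =>
    simp only [umpA_loop, hitA]
    cases h : d.get? (pfx s (i + 1)) with
    | some v => simp [pfx] at h; simp [h]
    | none => simp [pfx] at h; simp [h, ih]

theorem hitA_none_iff (s : List Char) (d : PySem.Dict (List Char) (List Char)) (i : Nat) :
    hitA s d i = none ↔ ∀ j, 1 ≤ j → j ≤ i → d.get? (pfx s j) = none := by
  induction i with
  | zero => simp [hitA]; intro j h1 h2; omega
  | succ i ih =>
    simp only [hitA]
    cases h : d.get? (pfx s (i + 1)) with
    | some v =>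
      simp only []
      constructor
      · intro hc; exact absurd hc (by simp)
      · intro hall; exact absurd (hall (i+1) (by omega) (le_refl _)) (by simp [h])
    | none =>
      simp only []
      rw [ih]
      constructor
      · intro hall j h1 h2
        rcases Nat.lt_or_ge j (i+1) with hlt | hge
        · exact hall j h1 (by omega)
        · have : j = i + 1 := by omega
          rw [this]; exact h
      · intro hall j h1 h2; exact hall j h1 (by omega)

theorem hitA_some (s : List Char) (d : PySem.Dict (List Char) (List Char)) (i : Nat) (j : Nat) (v : List Char)
    (h : hitA s d i = some (j, v)) :
    1 ≤ j ∧ j ≤ i ∧ d.get? (pfx s j) = some v ∧ ∀ j', j < j' → j' ≤ i → d.get? (pfx s j') = none := by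
  induction i with
  | zero => simp [hitA] at h
  | succ i ih =>
    rw [hitA] at h
    cases hg : d.get? (pfx s (i + 1)) with
    | some w =>
      rw [hg] at h
      simp at h
      obtain ⟨rfl, rfl⟩ := h
      exact ⟨by omega, le_refl _, hg, by intro j' h1 h2; omega⟩
    | none =>
      rw [hg] at h
      simp at h
      obtain ⟨h1, h2, h3, h4⟩ := ih h
      refine ⟨h1, by omega, h3, ?_⟩
      intro j' hj1 hj2
      rcases Nat.lt_or_ge j' (i+1) with hlt | hge
      · exact h4 j' hj1 (by omega)
      · have : j' = i + 1 := by omega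
        rw [this]; exact hg

theorem scan_ge_acc (s : List Char) (l : List (List Char × List Char)) : ∀ (bk bv : List Char),
    ∃ k' v', umpB_scan s l (some (bk, bv)) = some (k', v') ∧ bk.length ≤ k'.length := by
  induction l with
  | nil => intro bk bv; exact ⟨bk, bv, rfl, le_refl _⟩
  | cons kv rest ih =>
    intro bk bv
    obtain ⟨key, value⟩ := kv
    by_cases hm : (s == key || PySem.Chars.startswith s (key ++ ['.'])) = true
    · rw [umpB_scan]
      rw [if_pos hm]
      by_cases hlen : bk.length < key.length
      · simp only [if_pos hlen]
        obtain ⟨k', v', hr, hle⟩ := ih key value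
        exact ⟨k', v', hr, by omega⟩
      · simp only [if_neg hlen]
        exact ih bk bv
    · rw [umpB_scan, if_neg hm]
      exact ih bk bv

theorem scan_ge (s : List Char) (l : List (List Char × List Char)) : ∀ (b : Option (List Char × List Char))
    (kv : List Char × List Char), kv ∈ l → mtch s kv.1 = true →
    ∃ k' v', umpB_scan s l b = some (k', v') ∧ kv.1.length ≤ k'.length := by
  induction l with
  | nil => intro b kv h; simp at h
  | cons hd rest ih =>
    intro b kv hmem hm
    obtain ⟨key, value⟩ := hd
    rcases List.mem_cons.mp hmem with rfl | hmem'
    · have hm' : (s == key || PySem.Chars.startswith s (key ++ ['.'])) = true := hm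
      cases b with
      | none =>
        rw [umpB_scan, if_pos hm']
        exact scan_ge_acc s rest key value
      | some p =>
        obtain ⟨bk, bv⟩ := p
        rw [umpB_scan, if_pos hm']
        by_cases hlen : bk.length < key.length
        · rw [if_pos hlen]; exact scan_ge_acc s rest key value
        · rw [if_neg hlen]
          obtain ⟨k', v', hr, hle⟩ := scan_ge_acc s rest bk bv
          refine ⟨k', v', hr, ?_⟩
          show key.length ≤ k'.length
          omega
    · by_cases hc : (s == key || PySem.Chars.startswith s (key ++ ['.'])) = true
      · cases b with
        | none =>
          rw [umpB_scan, if_pos hc]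
          exact ih _ kv hmem' hm
        | some p =>
          obtain ⟨bk, bv⟩ := p
          rw [umpB_scan, if_pos hc]
          by_cases hlen : bk.length < key.length
          · rw [if_pos hlen]; exact ih _ kv hmem' hm
          · rw [if_neg hlen]; exact ih _ kv hmem' hm
      · cases b with
        | none => rw [umpB_scan, if_neg hc]; exact ih _ kv hmem' hm
        | some p => rw [umpB_scan, if_neg hc]; exact ih _ kv hmem' hm

theorem scan_mem (s : List Char) (l : List (List Char × List Char)) : ∀ (b : Option (List Char × List Char)),
    umpB_scan s l b = b ∨ ∃ kv, kv ∈ l ∧ umpB_scan s l b = some kv ∧ mtch s kv.1 = true := by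
  induction l with
  | nil => intro b; left; rfl
  | cons hd rest ih =>
    intro b
    obtain ⟨key, value⟩ := hd
    by_cases hc : (s == key || PySem.Chars.startswith s (key ++ ['.'])) = true
    · cases b with
      | none =>
        rw [umpB_scan, if_pos hc]
        rcases ih (some (key, value)) with heq | ⟨kv, hkv, heq, hm⟩
        · right; exact ⟨(key, value), List.mem_cons_self, heq, hc⟩
        · right; exact ⟨kv, List.mem_cons_of_mem _ hkv, heq, hm⟩
      | some p =>
        obtain ⟨bk, bv⟩ := p
        rw [umpB_scan, if_pos hc]
        by_cases hlen : bk.length < key.length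
        · rw [if_pos hlen]
          rcases ih (some (key, value)) with heq | ⟨kv, hkv, heq, hm⟩
          · right; exact ⟨(key, value), List.mem_cons_self, heq, hc⟩
          · right; exact ⟨kv, List.mem_cons_of_mem _ hkv, heq, hm⟩
        · rw [if_neg hlen]
          rcases ih (some (bk, bv)) with heq | ⟨kv, hkv, heq, hm⟩
          · left; exact heq
          · right; exact ⟨kv, List.mem_cons_of_mem _ hkv, heq, hm⟩
    · cases b with
      | none =>
        rw [umpB_scan, if_neg hc]
        rcases ih none with heq | ⟨kv, hkv, heq, hm⟩
        · left; exact heq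
        · right; exact ⟨kv, List.mem_cons_of_mem _ hkv, heq, hm⟩
      | some p =>
        rw [umpB_scan, if_neg hc]
        rcases ih (some p) with heq | ⟨kv, hkv, heq, hm⟩
        · left; exact heq
        · right; exact ⟨kv, List.mem_cons_of_mem _ hkv, heq, hm⟩


-- both loops agree, at the char-list level
theorem core_eq (s : List Char) (d : PySem.Dict (List Char) (List Char)) (hnodup : d.keys.Nodup) :
    umpA_loop (fSplit s) d (fSplit s).length =
      (umpB_scan s d.items none).map (fun p => p.2 ++ s.drop p.1.length) := by
  rw [umpA_loop_eq_hitA]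
  cases hh : hitA s d (fSplit s).length with
  | none =>
    rcases scan_mem s d.items none with heq | ⟨kv, hmem, heq, hm⟩
    · rw [heq]; rfl
    · exfalso
      obtain ⟨i, hi1, hi2, hk⟩ := (mtch_iff s kv.1).mp hm
      have hget : d.get? kv.1 = some kv.2 := PySem.Dict.get?_of_mem_items d hmem hnodup
      rw [hk] at hget
      rw [(hitA_none_iff s d (fSplit s).length).mp hh i hi1 hi2] at hget
      simp at hget
  | some p =>
    obtain ⟨j, v⟩ := p
    obtain ⟨hj1, hjn, hget, hmax⟩ := hitA_some s d (fSplit s).length j v hh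
    have hmem : (pfx s j, v) ∈ d.items :=
      (PySem.Dict.get?_eq_some_iff_mem_items d _ _ hnodup).mp hget
    have hmtch : mtch s (pfx s j) = true := (mtch_iff s _).mpr ⟨j, hj1, hjn, rfl⟩
    obtain ⟨k', v', hscan, hlen⟩ := scan_ge s d.items none (pfx s j, v) hmem hmtch
    rcases scan_mem s d.items none with heq | ⟨kv, hmem', heq, hm'⟩
    · rw [heq] at hscan; simp at hscan
    · rw [heq] at hscan
      obtain rfl : kv = (k', v') := Option.some.inj hscan
      obtain ⟨i', hi1', hi2', hk'⟩ := (mtch_iff s k').mp hm'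
      have hget' : d.get? k' = some v' := PySem.Dict.get?_of_mem_items d hmem' hnodup
      have hij : i' ≤ j := by
        by_contra hc
        rw [hk'] at hget'
        rw [hmax i' (by omega) hi2'] at hget'
        simp at hget'
      have hlen' : (pfx s j).length ≤ k'.length := hlen
      have hji : i' = j := by
        rcases Nat.lt_or_ge i' j with hlt | hge
        · exfalso
          have := pfx_length_lt s hi1' hlt hjn
          rw [hk'] at hlen'
          omega
        · omega
      subst hji
      rw [← hk'] at hget
      rw [hget'] at hget
      have hv : v' = v := Option.some.inj hget
      rw [heq]
      simp only [Option.map_some]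
      rw [hk', hv]
      rw [out_eq s v i' hj1 hjn]

theorem nodup_d (mm : List (String × String)) :
    (PySem.Dict.ofList (mm.map (fun kv => (kv.1.toList, kv.2.toList)))).keys.Nodup :=
  PySem.Dict.nodup_keys_ofList _

-- ===== VERDICT (by name: the statement is the Claim_ definition above) =====
theorem update_module_path_spec : Claim_equal_update_module_path := by
  unfold Claim_equal_update_module_path
  intro path mm _
  unfold Spec_update_module_path update_module_path update_module_path_alt
  simp only [splitOn_eq_fSplit]
  rw [core_eq path.toList _ (nodup_d mm)]
  cases hsc : umpB_scan path.toList (PySem.Dict.ofList (mm.map (fun kv => (kv.1.toList, kv.2.toList)))).items none with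
  | none => rfl
  | some p => obtain ⟨bk, bv⟩ := p; rfl
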